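-- pv_equiv track=rewrite | github.com/ARCAlhau80/LotoScope | benchmark_estrategias.py | estrategia_ausencia_longa
-- ===== SOURCE A (Python) =====
-- def estrategia_ausencia_longa(hist):
--     """Excluir numeros com ausencia MUITO longa (>8 concursos)"""
--     ausencia = {}
--     for n in range(1, 26):
--         for i, r in enumerate(hist[:15]):
--             if n in r['numeros']:
--                 ausencia[n] = i
--                 break
--         else:
--             ausencia[n] = 15  # Nao apareceu nos ultimos 15
--
--     cand = [(n, ausencia[n]) for n in range(1, 26)]
--     cand.sort(key=lambda x: -x[1])  # maior ausencia primeiro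
--     return [c[0] for c in cand[:2]]
-- ===== SOURCE B (Python) =====
-- def estrategia_ausencia_longa(hist):
--     """Excluir numeros com ausencia MUITO longa (>8 concursos)"""
--     first_seen = {}
--     for i, r in enumerate(hist[:15]):
--         for n in r['numeros']:
--             first_seen.setdefault(n, i)
--     return sorted(range(1, 26), key=lambda n: -first_seen.get(n, 15))[:2]
-- ===== Notes on version B (the rewrite author's own statement) =====
-- stated objective: alternative
-- what changed: Replaces A's per-number (25x) rescans of the first 15 records by a single record-driven pass filling a first-seen index table with setdefault, then stable-sorts the numbers 1..25 directly by negated absence instead of sorting decorated pairs and projecting.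
import Mathlib
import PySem

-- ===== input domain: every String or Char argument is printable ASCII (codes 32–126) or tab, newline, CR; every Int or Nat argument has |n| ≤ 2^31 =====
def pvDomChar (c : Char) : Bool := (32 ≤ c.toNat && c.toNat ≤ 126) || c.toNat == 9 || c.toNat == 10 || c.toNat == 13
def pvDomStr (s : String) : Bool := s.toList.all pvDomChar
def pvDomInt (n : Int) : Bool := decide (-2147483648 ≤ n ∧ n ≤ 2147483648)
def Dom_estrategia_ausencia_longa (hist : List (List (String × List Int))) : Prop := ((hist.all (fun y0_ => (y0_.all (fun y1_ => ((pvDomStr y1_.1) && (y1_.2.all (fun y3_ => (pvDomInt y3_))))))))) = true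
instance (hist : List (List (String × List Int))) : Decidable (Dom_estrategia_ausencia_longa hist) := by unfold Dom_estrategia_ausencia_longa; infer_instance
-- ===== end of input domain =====

-- B replaces A's per-number rescans of the history by one record-driven pass filling a
-- first-seen table (setdefault), then sorts the numbers 1..25 directly (objective: alternative).

-- ===== PORT A =====
-- inner 'for i, r in enumerate(hist[:15]): if n in r['numeros']: ausencia[n]=i; break / else: 15'
def pvLoopA (n : Int) (i : Int) (rs : List (List (String × List Int))) : Int :=
  match rs with
  | [] => 15
  | r :: rest =>
      if n ∈ (PySem.Dict.mk r).getD "numeros" [] then i else pvLoopA n (i + 1) rest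

def estrategia_ausencia_longa (hist : List (List (String × List Int))) : List Int :=
  -- ausencia = {n: first index of n in hist[:15], else 15} built for n = 1..25
  -- cand = [(n, ausencia[n])]; cand.sort(key=lambda x: -x[1]); [c[0] for c in cand[:2]]
  ((PySem.List.sorted
      ((PySem.List.pyRange 1 26 1).map (fun n =>
        (n, ((PySem.List.pyRange 1 26 1).foldl
              (fun d m => d.insert m (pvLoopA m 0 (hist.take 15)))
              (PySem.Dict.empty : PySem.Dict Int Int)).getD n 0)))
      (fun x => -x.2) false).take 2).map (fun c => c.1)

-- ===== PORT B =====
def estrategia_ausencia_longa_alt (hist : List (List (String × List Int))) : List Int :=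
  -- first_seen: one pass over enumerate(hist[:15]) with setdefault; then
  -- sorted(range(1,26), key=lambda n: -first_seen.get(n, 15))[:2]
  (PySem.List.sorted (PySem.List.pyRange 1 26 1)
      (fun n =>
        -(((PySem.List.enumerate (hist.take 15) 0).foldl
            (fun d p => ((PySem.Dict.mk p.2).getD "numeros" []).foldl
              (fun d m => d.setdefault m p.1) d)
            (PySem.Dict.empty : PySem.Dict Int Int)).getD n 15))
      false).take 2

-- ===== PRECONDITION & SPEC =====
-- Pre_ excludes histories where a record among the first 15 lacks the key 'numeros':
-- there A (and B) raise KeyError.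
def Pre_estrategia_ausencia_longa (hist : List (List (String × List Int))) : Prop :=
  ∀ r ∈ hist.take 15, (PySem.Dict.mk r).contains "numeros" = true
instance (hist : List (List (String × List Int))) : Decidable (Pre_estrategia_ausencia_longa hist) := by unfold Pre_estrategia_ausencia_longa; infer_instance

def pvWitness_estrategia_ausencia_longa : (List (List (String × List Int))) :=
  [[("numeros", [3, 7])], [("numeros", [1])]]

def Spec_estrategia_ausencia_longa (hist : List (List (String × List Int))) (out : List Int) : Prop := out = estrategia_ausencia_longa_alt hist
instance (hist : List (List (String × List Int))) (out : List Int) : Decidable (Spec_estrategia_ausencia_longa hist out) := by unfold Spec_estrategia_ausencia_longa; infer_instance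

-- ===== CLAIM (what is proved, stated in full; the proofs are below) =====
def Claim_equal_estrategia_ausencia_longa : Prop := ∀ (hist : List (List (String × List Int))), Dom_estrategia_ausencia_longa hist → Pre_estrategia_ausencia_longa hist → Spec_estrategia_ausencia_longa hist (estrategia_ausencia_longa hist)

-- ===== LEMMAS AND PROOFS =====

-- first appearance index as an Option (none = absent from all records)
def pvFirstA (n : Int) (i : Int) (rs : List (List (String × List Int))) : Option Int :=
  match rs with
  | [] => none
  | r :: rest =>
      if n ∈ (PySem.Dict.mk r).getD "numeros" [] then some i else pvFirstA n (i + 1) rest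

lemma pvLoopA_eq_firstA (n i : Int) (rs : List (List (String × List Int))) :
    pvLoopA n i rs = (pvFirstA n i rs).getD 15 := by
  induction rs generalizing i with
  | nil => rfl
  | cons r rest ih =>
      simp only [pvLoopA, pvFirstA]
      split_ifs <;> simp [ih]

lemma get?_setdefault_fold (ns : List Int) (d : PySem.Dict Int Int) (i n : Int) :
    ((ns.foldl (fun d m => d.setdefault m i) d).get? n)
      = (d.get? n).orElse (fun _ => if n ∈ ns then some i else none) := by
  induction ns generalizing d with
  | nil => simp
  | cons x rest ih =>
      simp only [List.foldl_cons, ih]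
      by_cases hx : n = x
      · subst hx
        rw [PySem.Dict.get?_setdefault_self]
        cases h : d.get? n <;> simp [Option.orElse]
      · rw [PySem.Dict.get?_setdefault_of_ne _ _ hx]
        cases h : d.get? n <;> simp [Option.orElse, hx]

lemma get?_outer_fold (rs : List (List (String × List Int))) (i : Int)
    (d : PySem.Dict Int Int) (n : Int) :
    (((PySem.List.enumerate rs i).foldl
        (fun d p => ((PySem.Dict.mk p.2).getD "numeros" []).foldl (fun d m => d.setdefault m p.1) d)
        d).get? n)
      = (d.get? n).orElse (fun _ => pvFirstA n i rs) := by
  induction rs generalizing i d with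
  | nil => simp [PySem.List.enumerate_nil, pvFirstA]
  | cons r rest ih =>
      rw [PySem.List.enumerate_cons]
      simp only [List.foldl_cons, ih, get?_setdefault_fold, pvFirstA]
      by_cases hm : n ∈ (PySem.Dict.mk r).getD "numeros" []
      · cases h : d.get? n <;> simp [hm, Option.orElse]
      · cases h : d.get? n <;> simp [hm, Option.orElse]

lemma getD_insert_fold (l : List Int) (f : Int → Int) (d : PySem.Dict Int Int) (n d0 : Int) :
    ((l.foldl (fun d m => d.insert m (f m)) d).getD n d0)
      = if n ∈ l then f n else d.getD n d0 := by
  induction l generalizing d with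
  | nil => simp
  | cons x rest ih =>
      simp only [List.foldl_cons, ih, PySem.Dict.getD_insert, List.mem_cons]
      by_cases hr : n ∈ rest <;> by_cases hx : n = x <;> simp [hr, hx]

-- stable sort commutes with mapping an injective-key decoration
lemma sorted_map_pair (l : List Int) (g : Int → Int) :
    PySem.List.sorted (l.map (fun n => (n, g n))) (fun x : Int × Int => -x.2) false
      = (PySem.List.sorted l (fun n => -g n) false).map (fun n => (n, g n)) := by
  rw [PySem.List.sorted_eq_foldl_insertBy, PySem.List.sorted_eq_foldl_insertBy]
  have key : ∀ (acc : List Int) (x : Int),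
      PySem.List.insertBy (fun a b : Int × Int => decide (-a.2 < -b.2)) (x, g x)
          (acc.map (fun n => (n, g n)))
        = (PySem.List.insertBy (fun a b : Int => decide (-g a < -g b)) x acc).map
            (fun n => (n, g n)) := by
    intro acc x
    induction acc with
    | nil => simp [PySem.List.insertBy]
    | cons y ys ihy =>
        simp only [List.map_cons, PySem.List.insertBy]
        split_ifs with h <;> simp_all
  have main : ∀ (l' : List Int) (acc : List Int),
      List.foldl (fun acc x => PySem.List.insertBy (fun a b : Int × Int => decide (-a.2 < -b.2)) x acc)
          (acc.map (fun n => (n, g n))) (l'.map (fun n => (n, g n)))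
        = (List.foldl (fun acc x => PySem.List.insertBy (fun a b : Int => decide (-g a < -g b)) x acc)
            acc l').map (fun n => (n, g n)) := by
    intro l' ; induction l' with
    | nil => intro acc; rfl
    | cons x xs ih => intro acc; simp only [List.map_cons, List.foldl_cons, key]; exact ih _
  simpa using main l []

lemma getD_fs (hist : List (List (String × List Int))) (n : Int) :
    (((PySem.List.enumerate (hist.take 15) 0).foldl
        (fun d p => ((PySem.Dict.mk p.2).getD "numeros" []).foldl (fun d m => d.setdefault m p.1) d)
        (PySem.Dict.empty : PySem.Dict Int Int)).getD n 15)
      = pvLoopA n 0 (hist.take 15) := by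
  rw [PySem.Dict.getD_eq_get?_getD, get?_outer_fold, pvLoopA_eq_firstA]
  simp [Option.orElse]

-- ===== VERDICT (by name: the statement is the Claim_ definition above) =====
theorem estrategia_ausencia_longa_spec : Claim_equal_estrategia_ausencia_longa := by
  intro hist _ _
  show estrategia_ausencia_longa hist = estrategia_ausencia_longa_alt hist
  unfold estrategia_ausencia_longa estrategia_ausencia_longa_alt
  have hcand : (PySem.List.pyRange 1 26 1).map
      (fun n => (n, ((PySem.List.pyRange 1 26 1).foldl
          (fun d m => d.insert m (pvLoopA m 0 (hist.take 15))) (PySem.Dict.empty : PySem.Dict Int Int)).getD n 0))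
      = (PySem.List.pyRange 1 26 1).map (fun n => (n, pvLoopA n 0 (hist.take 15))) := by
    apply List.map_congr_left
    intro a ha
    rw [getD_insert_fold]
    simp [ha]
  rw [hcand, sorted_map_pair]
  have hkey : (fun n : Int => -(((PySem.List.enumerate (hist.take 15) 0).foldl
        (fun d p => ((PySem.Dict.mk p.2).getD "numeros" []).foldl (fun d m => d.setdefault m p.1) d)
        (PySem.Dict.empty : PySem.Dict Int Int)).getD n 15))
      = (fun n : Int => -(pvLoopA n 0 (hist.take 15))) := by
    funext n; rw [getD_fs]
  rw [hkey]
  simp [List.map_take, List.map_map, Function.comp_def]
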